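-- pv_equiv track=rewrite | github.com/Rifhutch/cellular-rocktomata | rocktomata.py | livin_large
-- ===== SOURCE A (Python) =====
-- my_heart = 0
--
-- my_desire = 1
--
-- my_thirst = 2
--
-- def liftin_high(the_spirit, Greatness):
--     Davy = 0
--     Gina = 1
--     while Davy != Greatness:
--         Gina = the_spirit * Gina
--         Davy += 1
--     return Gina
--
-- def show_me_the_way(my_love):
--     Existence = 0
--     if my_love < my_thirst:
--         return Existence
--     while liftin_high(my_thirst,Existence) < my_love + my_desire:
--         Existence += 1
--     Existence -= 1
--     return Existence
--
-- def truth_of_the_now(my_time, your_place):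
--     if your_place < my_heart:
--         return my_heart
--     while my_time > my_heart:
--         Truth = 0
--         Truth = show_me_the_way(my_time)
--         if your_place > Truth:
--             return my_heart
--         if your_place == Truth:
--             return my_desire
--         my_time = my_time - liftin_high(my_thirst,Truth)
--     return my_heart
--
-- def livin_life(my_cool, my_calm, my_need, my_breath):
--     your_voice = 2
--     your_lovin = 4
--     a_moment = my_cool + your_voice * my_calm + your_lovin * my_need
--     if truth_of_the_now(my_breath, a_moment) != False:
--         return my_desire
--     return my_heart
--
-- def livin_large(my_time, my_money, the_way):
--     Life = 0
--     while my_money != my_heart - my_desire: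
--         my_money -= 1
--         my_cool = truth_of_the_now(my_time, my_money)
--         my_money += 1
--         my_calm = truth_of_the_now(my_time, my_money)
--         my_money += 1
--         my_need = truth_of_the_now(my_time, my_money)
--         my_money -= 1
--         your_life = livin_life(my_cool, my_calm, my_need, the_way)
--         Life = Life + your_life * liftin_high(my_thirst, my_money)
--         my_money -= 1
--     return Life
-- ===== SOURCE B (Python) =====
-- def livin_large(my_time, my_money, the_way):
--     # One Wolfram elementary-CA step over my_time's bits, via shifts and masks.
--     cells = my_time if my_time > 0 else 0
--     rule = the_way if the_way > 0 else 0
--     shifted = cells << 1          # bit pos of `shifted` is cell pos-1 of `cells`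
--     out = 0
--     for pos in range(my_money + 1):
--         idx = (shifted >> pos) & 7      # neighbourhood left+2*mid+4*right
--         out += ((rule >> idx) & 1) << pos
--     return out
-- ===== Notes on version B (the rewrite author's own statement) =====
-- stated objective: faster
-- what changed: Replaces the nested power-loop / floor-log bit-extraction machinery (liftin_high/show_me_the_way/truth_of_the_now) with a single linear pass using bit shifts and masks over the integer's binary representation; Pre_ excludes only my_money < -1, where A's while loop never terminates.
import Mathlib
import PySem

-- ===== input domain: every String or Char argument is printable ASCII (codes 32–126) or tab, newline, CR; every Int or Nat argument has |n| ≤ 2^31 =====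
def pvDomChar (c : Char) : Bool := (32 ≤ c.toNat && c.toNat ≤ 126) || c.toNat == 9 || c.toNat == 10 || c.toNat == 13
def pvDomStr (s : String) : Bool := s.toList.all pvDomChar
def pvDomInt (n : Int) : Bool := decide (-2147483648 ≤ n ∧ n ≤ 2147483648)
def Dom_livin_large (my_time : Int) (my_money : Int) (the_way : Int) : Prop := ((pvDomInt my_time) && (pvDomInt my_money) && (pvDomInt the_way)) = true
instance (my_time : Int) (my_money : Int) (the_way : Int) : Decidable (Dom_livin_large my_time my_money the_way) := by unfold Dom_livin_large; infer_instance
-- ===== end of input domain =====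

-- B replaces A's nested power-loop / floor-log bit machinery with one linear pass of
-- shifts and masks over the integer's bits (objective: faster).

-- ===== PORT A =====
-- Python: Davy = 0; while Davy != Greatness: Gina = the_spirit * Gina; Davy += 1.
-- Davy counts up from 0, so the loop runs exactly Greatness.toNat times when it
-- terminates (for Greatness < 0 the Python loop diverges); `fuel` is that count.
def liftin_high_go (the_spirit : Int) : Nat → Int → Int
  | 0, Gina => Gina
  | fuel + 1, Gina => liftin_high_go the_spirit fuel (the_spirit * Gina)

def liftin_high (the_spirit : Int) (Greatness : Int) : Int :=
  liftin_high_go the_spirit Greatness.toNat 1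

-- Python: Existence = 0; while liftin_high(2, Existence) < my_love + 1: Existence += 1.
-- The loop body runs at most my_love.toNat times (2^E outgrows my_love); fuel bounds it.
def smtw_go (my_love : Int) : Nat → Int → Int
  | 0, Existence => Existence
  | fuel + 1, Existence =>
    if liftin_high 2 Existence < my_love + 1 then smtw_go my_love fuel (Existence + 1)
    else Existence

def show_me_the_way (my_love : Int) : Int :=
  if my_love < 2 then 0
  else smtw_go my_love (my_love.toNat + 1) 0 - 1

-- Python: while my_time > 0: Truth = show_me_the_way(my_time); …; my_time -= 2^Truth.
-- my_time drops by at least 1 per iteration, so my_time.toNat iterations suffice;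
-- exhausted fuel returns the loop's fall-through value 0 (my_heart).
def truth_of_the_now_go : Nat → Int → Int → Int
  | 0, _, _ => 0
  | fuel + 1, my_time, your_place =>
    if 0 < my_time then
      let Truth := show_me_the_way my_time
      if Truth < your_place then 0
      else if your_place = Truth then 1
      else truth_of_the_now_go fuel (my_time - liftin_high 2 Truth) your_place
    else 0

def truth_of_the_now (my_time : Int) (your_place : Int) : Int :=
  if your_place < 0 then 0 else truth_of_the_now_go my_time.toNat my_time your_place

-- Python's `truth_of_the_now(...) != False` on a 0/1 int is `≠ 0`
def livin_life (my_cool : Int) (my_calm : Int) (my_need : Int) (my_breath : Int) : Int :=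
  let a_moment := my_cool + 2 * my_calm + 4 * my_need
  if truth_of_the_now my_breath a_moment ≠ 0 then 1 else 0

-- Python: while my_money != -1: … ; my_money -= 1.  my_money counts down, so the
-- loop runs exactly (my_money + 1).toNat times when it terminates (for
-- my_money < -1 the Python loop diverges); `fuel` is that count.
def livin_large_go (my_time : Int) (the_way : Int) : Nat → Int → Int → Int
  | 0, _, Life => Life
  | fuel + 1, my_money, Life =>
    let my_cool := truth_of_the_now my_time (my_money - 1)
    let my_calm := truth_of_the_now my_time my_money
    let my_need := truth_of_the_now my_time (my_money + 1)
    let your_life := livin_life my_cool my_calm my_need the_way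
    livin_large_go my_time the_way fuel (my_money - 1)
      (Life + your_life * liftin_high 2 my_money)

def livin_large (my_time : Int) (my_money : Int) (the_way : Int) : Int :=
  livin_large_go my_time the_way (my_money + 1).toNat my_money 0

-- ===== PORT B =====
-- transliteration of Source B; `pos` ranges over range(my_money+1), whose elements are
-- exactly List.range (my_money+1).toNat as non-negative ints, done here in Nat
def livin_large_alt (my_time : Int) (my_money : Int) (the_way : Int) : Int :=
  let cells : Nat := (if 0 < my_time then my_time else 0).toNat
  let rule : Nat := (if 0 < the_way then the_way else 0).toNat
  let shifted : Nat := cells <<< 1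
  (((List.range (my_money + 1).toNat).foldl
    (fun out pos => out + (((rule >>> ((shifted >>> pos) &&& 7)) &&& 1) <<< pos)) 0 : Nat) : Int)

-- ===== PRECONDITION & SPEC =====
-- Pre_ excludes only my_money < -1, where Python's A loops forever (no return value).
def Pre_livin_large (my_time : Int) (my_money : Int) (the_way : Int) : Prop :=
  -1 ≤ my_money
instance (my_time : Int) (my_money : Int) (the_way : Int) : Decidable (Pre_livin_large my_time my_money the_way) := by unfold Pre_livin_large; infer_instance

def pvWitness_livin_large : Int × Int × Int := (13, 4, 30)

def Spec_livin_large (my_time : Int) (my_money : Int) (the_way : Int) (out : Int) : Prop := out = livin_large_alt my_time my_money the_way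
instance (my_time : Int) (my_money : Int) (the_way : Int) (out : Int) : Decidable (Spec_livin_large my_time my_money the_way out) := by unfold Spec_livin_large; infer_instance

-- ===== CLAIM (what is proved, stated in full; the proofs are below) =====
def Claim_equal_livin_large : Prop := ∀ (my_time : Int) (my_money : Int) (the_way : Int), Dom_livin_large my_time my_money the_way → Pre_livin_large my_time my_money the_way → Spec_livin_large my_time my_money the_way (livin_large my_time my_money the_way)

-- ===== LEMMAS AND PROOFS =====

-- the single-bit value A extracts, as a natural number
def bitN (n : Nat) (p : Nat) : Nat := n / 2 ^ p % 2

theorem liftin_high_go_pow (f : Nat) (Gina : Int) :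
    liftin_high_go 2 f Gina = 2 ^ f * Gina := by
  induction f generalizing Gina with
  | zero => simp [liftin_high_go]
  | succ f ih =>
    rw [liftin_high_go, ih]
    ring

theorem liftin_high_two (E : Int) : liftin_high 2 E = 2 ^ E.toNat := by
  unfold liftin_high
  rw [liftin_high_go_pow]
  ring

theorem smtw_go_spec (t : Int) (ht : 1 ≤ t) (fuel : Nat) (E : Int) (hE : 0 ≤ E)
    (hle : E ≤ Nat.log 2 t.toNat + 1)
    (hfuel : (Nat.log 2 t.toNat + 1 - E.toNat) ≤ fuel) :
    smtw_go t fuel E = Nat.log 2 t.toNat + 1 := by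
  have hn0 : t.toNat ≠ 0 := by omega
  have hcond : liftin_high 2 E < t + 1 ↔ E ≤ (Nat.log 2 t.toNat : Int) := by
    rw [liftin_high_two E]
    have hb : (2:Int) ^ E.toNat = ((2 ^ E.toNat : Nat) : Int) := by push_cast; ring
    constructor
    · intro hlt
      have : (2 : Nat) ^ E.toNat ≤ t.toNat := by omega
      have := (Nat.le_log_iff_pow_le (by norm_num) hn0).mpr this
      omega
    · intro hle'
      have : E.toNat ≤ Nat.log 2 t.toNat := by omega
      have := (Nat.le_log_iff_pow_le (by norm_num) hn0).mp this
      omega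
  match fuel with
  | 0 =>
    simp only [smtw_go]
    omega
  | f + 1 =>
    by_cases hc : E ≤ (Nat.log 2 t.toNat : Int)
    · rw [smtw_go, if_pos (hcond.mpr hc)]
      exact smtw_go_spec t ht f (E + 1) (by omega) (by omega) (by omega)
    · have hE' : E = (Nat.log 2 t.toNat : Int) + 1 := by omega
      rw [smtw_go, if_neg (by rw [hcond]; omega)]
      omega

theorem show_me_the_way_spec (t : Int) (ht : 1 ≤ t) :
    show_me_the_way t = Nat.log 2 t.toNat := by
  unfold show_me_the_way
  by_cases h2 : t < 2
  · have : t = 1 := by omega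
    subst this
    simp [Nat.log]
  · have hlog : Nat.log 2 t.toNat < t.toNat := by
      have h1 : 2 ^ Nat.log 2 t.toNat ≤ t.toNat := Nat.pow_log_le_self 2 (by omega)
      have h2 : Nat.log 2 t.toNat < 2 ^ Nat.log 2 t.toNat := Nat.lt_two_pow_self
      omega
    rw [if_neg h2, smtw_go_spec t ht (t.toNat + 1) 0 (by omega) (by omega) (by omega)]
    omega

-- bit p is unchanged by removing the top set bit (p strictly below it)
theorem bitN_sub_top (n L p : Nat) (h1 : 2 ^ L ≤ n) (h2 : n < 2 ^ (L + 1)) (hp : p < L) :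
    bitN (n - 2 ^ L) p = bitN n p := by
  unfold bitN
  have hk : 2 ^ L = 2 ^ p * (2 ^ (L - p - 1) * 2) := by
    rw [← pow_succ, ← pow_add]
    congr 1
    omega
  have hpos : 0 < 2 ^ p := Nat.two_pow_pos p
  have hdiv : n / 2 ^ p = (n - 2 ^ L) / 2 ^ p + 2 ^ (L - p - 1) * 2 := by
    have hsplit : n = (n - 2 ^ L) + 2 ^ p * (2 ^ (L - p - 1) * 2) := by omega
    conv_lhs => rw [hsplit]
    rw [Nat.add_mul_div_left _ _ hpos]
  rw [hdiv]
  omega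

theorem totn_go_spec (fuel : Nat) (t p : Int) (hp : 0 ≤ p) (hfuel : t.toNat ≤ fuel) :
    truth_of_the_now_go fuel t p = bitN t.toNat p.toNat := by
  induction fuel generalizing t with
  | zero =>
    have : t.toNat = 0 := by omega
    rw [truth_of_the_now_go, this]
    unfold bitN
    simp
  | succ f ih =>
    by_cases ht : 0 < t
    · have hn0 : t.toNat ≠ 0 := by omega
      set n := t.toNat with hn
      set L := Nat.log 2 n with hL
      have hS : show_me_the_way t = (L : Int) := show_me_the_way_spec t (by omega)
      have hlow : 2 ^ L ≤ n := Nat.pow_log_le_self 2 hn0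
      have hhigh : n < 2 ^ (L + 1) := Nat.lt_pow_succ_log_self (by norm_num) n
      rw [truth_of_the_now_go, if_pos ht]
      simp only [hS]
      by_cases hgt : (L : Int) < p
      · rw [if_pos hgt]
        have : n < 2 ^ p.toNat :=
          lt_of_lt_of_le hhigh (Nat.pow_le_pow_right (by omega) (by omega))
        unfold bitN
        rw [Nat.div_eq_of_lt this]
        simp
      · rw [if_neg hgt]
        by_cases heq : p = (L : Int)
        · rw [if_pos heq]
          have hpL : p.toNat = L := by omega
          unfold bitN
          rw [hpL]
          have hq1 : 1 ≤ n / 2 ^ L := (Nat.one_le_div_iff (Nat.two_pow_pos L)).mpr hlow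
          have hq2 : n / 2 ^ L < 2 := by
            rw [Nat.div_lt_iff_lt_mul (Nat.two_pow_pos L)]
            have hps : 2 ^ (L + 1) = 2 ^ L * 2 := pow_succ 2 L
            omega
          omega
        · rw [if_neg heq]
          have hpL : p.toNat < L := by omega
          have hlift : liftin_high 2 (L : Int) = 2 ^ L := by
            rw [liftin_high_two]
            norm_num
          rw [hlift]
          have hpow : (2:Int) ^ L = ((2 ^ L : Nat) : Int) := by push_cast; ring
          have hpos : (0:Nat) < 2 ^ L := Nat.two_pow_pos L
          have htn : (t - (2:Int) ^ L).toNat = n - 2 ^ L := by omega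
          rw [ih (t - (2:Int) ^ L) (by omega), htn, bitN_sub_top n L p.toNat hlow hhigh hpL]
    · rw [truth_of_the_now_go, if_neg ht]
      have : t.toNat = 0 := by omega
      rw [this]
      unfold bitN
      simp

theorem totn_spec (t p : Int) :
    truth_of_the_now t p = if p < 0 then 0 else (bitN t.toNat p.toNat : Int) := by
  unfold truth_of_the_now
  split_ifs with h
  · rfl
  · exact totn_go_spec t.toNat t p (by omega) (le_refl _)

-- bitN facts
theorem bitN_lt_two (n p : Nat) : bitN n p < 2 := Nat.mod_lt _ (by omega)

-- the 3-bit window: (2n / 2^q) % 8 decomposes into the three neighbour bits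
theorem window_decomp (n q : Nat) :
    (2 * n) / 2 ^ q % 8 = bitN (2 * n) q + 2 * bitN n q + 4 * bitN n (q + 1) := by
  unfold bitN
  have h1 : (2 * n) / 2 ^ q / 2 = n / 2 ^ q := by
    rw [Nat.div_div_eq_div_mul, ← pow_succ, pow_succ]
    have : 2 ^ q * 2 = 2 * 2 ^ q := by ring
    rw [this, Nat.mul_div_mul_left _ _ (by omega)]
  have h2 : (2 * n) / 2 ^ q / 4 = n / 2 ^ (q + 1) := by
    have : (4 : Nat) = 2 * 2 := by norm_num
    rw [this, ← Nat.div_div_eq_div_mul, h1, Nat.div_div_eq_div_mul, ← pow_succ]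
  omega

-- A's new-cell value at non-negative position m equals B's shift/mask expression
theorem cell_eq (t w m : Int) (hm : 0 ≤ m) :
    livin_life (truth_of_the_now t (m - 1)) (truth_of_the_now t m)
      (truth_of_the_now t (m + 1)) w
    = ((w.toNat >>> (((t.toNat <<< 1) >>> m.toNat) &&& 7)) &&& 1 : Nat) := by
  set n := t.toNat with hn
  -- the left neighbour: bit (m-1) of n = bit m of 2n (also when m = 0)
  have hleft : truth_of_the_now t (m - 1) = (bitN (2 * n) m.toNat : Int) := by
    rw [totn_spec]
    by_cases h0 : m = 0
    · subst h0
      simp [bitN]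
    · rw [if_neg (by omega)]
      unfold bitN
      congr 1
      have hq : m.toNat = (m - 1).toNat + 1 := by omega
      rw [hq, pow_succ]
      have : 2 * n / (2 ^ (m - 1).toNat * 2) = 2 * n / 2 / 2 ^ (m - 1).toNat := by
        rw [Nat.div_div_eq_div_mul]
        ring_nf
      rw [this, Nat.mul_div_cancel_left n (by omega)]
  have hmid : truth_of_the_now t m = (bitN n m.toNat : Int) := by
    rw [totn_spec, if_neg (by omega)]
  have hright : truth_of_the_now t (m + 1) = (bitN n (m.toNat + 1) : Int) := by
    rw [totn_spec, if_neg (by omega)]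
    congr 2
    omega
  unfold livin_life
  simp only [hleft, hmid, hright]
  -- the index a_moment as a Nat
  have hNat : bitN (2 * n) m.toNat + 2 * bitN n m.toNat + 4 * bitN n (m.toNat + 1)
      = ((n <<< 1) >>> m.toNat) &&& 7 := by
    have hmask : ((n <<< 1) >>> m.toNat) &&& 7 = (2 * n) / 2 ^ m.toNat % 8 := by
      have := Nat.and_two_pow_sub_one_eq_mod ((n <<< 1) >>> m.toNat) 3
      norm_num at this
      rw [this, Nat.shiftRight_eq_div_pow, Nat.shiftLeft_eq]
      ring_nf
    rw [hmask, window_decomp n m.toNat]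
  -- now the rule lookup
  set idx : Nat := ((n <<< 1) >>> m.toNat) &&& 7 with hidx
  rw [totn_spec]
  have hAneg : ¬ (((bitN (2 * n) m.toNat : Nat) : Int) + 2 * ((bitN n m.toNat : Nat) : Int)
      + 4 * ((bitN n (m.toNat + 1) : Nat) : Int) < 0) := by omega
  have hA : (((bitN (2 * n) m.toNat : Nat) : Int) + 2 * ((bitN n m.toNat : Nat) : Int)
      + 4 * ((bitN n (m.toNat + 1) : Nat) : Int)).toNat = idx := by omega
  rw [if_neg hAneg, hA]
  have hbit : ((w.toNat >>> idx) &&& 1 : Nat) = bitN w.toNat idx := by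
    rw [Nat.and_one_is_mod, Nat.shiftRight_eq_div_pow]
    rfl
  rw [hbit]
  have := bitN_lt_two w.toNat idx
  split_ifs with hne
  · omega
  · omega

-- B's fold as a function of the upper bound
def pvSum (rule shifted : Nat) (k : Nat) : Nat :=
  (List.range k).foldl
    (fun out pos => out + (((rule >>> ((shifted >>> pos) &&& 7)) &&& 1) <<< pos)) 0

theorem pvSum_succ (rule shifted k : Nat) :
    pvSum rule shifted (k + 1)
      = pvSum rule shifted k + (((rule >>> ((shifted >>> k) &&& 7)) &&& 1) <<< k) := by
  unfold pvSum
  rw [List.range_succ, List.foldl_append]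
  rfl

theorem livin_large_go_spec (t w : Int) (fuel : Nat) (m : Int) (hm : -1 ≤ m)
    (hfuel : fuel = (m + 1).toNat) (Life : Int) :
    livin_large_go t w fuel m Life
      = Life + ((pvSum (if 0 < w then w else 0).toNat ((if 0 < t then t else 0).toNat <<< 1) (m + 1).toNat : Nat) : Int) := by
  have hclampT : ((if 0 < t then t else 0) : Int).toNat = t.toNat := by
    split_ifs <;> omega
  have hclampW : ((if 0 < w then w else 0) : Int).toNat = w.toNat := by
    split_ifs <;> omega
  rw [hclampT, hclampW]
  induction fuel generalizing m Life with
  | zero =>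
    have hm1 : m = -1 := by omega
    rw [livin_large_go, hm1]
    simp [pvSum]
  | succ f ih =>
    rw [livin_large_go]
    have ihm := ih (m - 1) (by omega) (by omega)
      (Life + livin_life (truth_of_the_now t (m - 1)) (truth_of_the_now t m) (truth_of_the_now t (m + 1)) w * liftin_high 2 m)
    rw [ihm]
    have hk : (m - 1 + 1).toNat = m.toNat := by omega
    have hk2 : (m + 1).toNat = m.toNat + 1 := by omega
    rw [hk, hk2, pvSum_succ]
    rw [cell_eq t w m (by omega), liftin_high_two m]
    push_cast [Nat.shiftLeft_eq]
    ring

-- ===== VERDICT (by name: the statement is the Claim_ definition above) =====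
theorem livin_large_spec : Claim_equal_livin_large := by
  intro my_time my_money the_way _hdom hpre
  unfold Spec_livin_large livin_large livin_large_alt
  rw [livin_large_go_spec my_time the_way (my_money + 1).toNat my_money hpre rfl 0]
  simp [pvSum]
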